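-- pv_equiv track=rewrite | github.com/hgene0929/algo | 이것이_취업을_위한_코딩테스트다/4주차_정렬/02_문제풀이/두_배열의_원소_교체.py | solution
-- ===== SOURCE A (Python) =====
-- import heapq,sys
--
-- def solution(n,k,a,b):
--     aq,bq = [],[]
--     for i in range(n):
--         heapq.heappush(aq,a[i])
--         heapq.heappush(bq,-b[i])
--     #원소교체 시작
--     for _ in range(k):
--         ae = heapq.heappop(aq)
--         be = heapq.heappop(bq)
--         heapq.heappush(aq,-be)
--         heapq.heappush(bq,ae)
--     #원소교체 끝
--     result = 0
--     while aq:
--         result += heapq.heappop(aq)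
--     return result
-- ===== SOURCE B (Python) =====
-- def solution(n, k, a, b):
--     # pool of a-values, and the b-pool stored negated (like a max-heap encoding),
--     # but maintained by plain linear min scans + in-place replacement instead of heaps
--     la = [a[i] for i in range(n)]
--     nb = [-b[i] for i in range(n)]
--     for _ in range(k):
--         m = min(la)
--         t = min(nb)
--         la[la.index(m)] = -t
--         nb[nb.index(t)] = m
--     return sum(la)
-- ===== Notes on version B (the rewrite author's own statement) =====
-- stated objective: simpler
-- what changed: Replaces both binary heaps (heappush/heappop) by plain lists maintained with linear min scans and in-place first-occurrence replacement, and builds the pools by slicing comprehensions instead of n heappushes.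
import Mathlib
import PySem

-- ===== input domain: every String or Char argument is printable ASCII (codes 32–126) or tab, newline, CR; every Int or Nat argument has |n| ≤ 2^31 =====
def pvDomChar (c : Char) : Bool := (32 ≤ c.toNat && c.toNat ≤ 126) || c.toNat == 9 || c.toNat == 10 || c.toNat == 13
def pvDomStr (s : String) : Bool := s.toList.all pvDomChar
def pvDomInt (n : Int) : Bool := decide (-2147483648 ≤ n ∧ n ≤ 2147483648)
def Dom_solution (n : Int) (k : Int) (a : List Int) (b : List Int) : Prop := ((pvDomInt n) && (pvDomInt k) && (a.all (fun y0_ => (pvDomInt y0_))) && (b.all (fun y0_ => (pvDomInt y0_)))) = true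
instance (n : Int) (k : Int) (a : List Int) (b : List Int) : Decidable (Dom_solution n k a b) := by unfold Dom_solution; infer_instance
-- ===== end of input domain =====

-- B replaces the two binary heaps by plain lists maintained with linear min scans
-- and in-place replacement (objective: simpler/alternative, same observable result).

-- ===== PORT A =====
-- heapq heap modelled as a multiset list: heappush = cons, heappop = (min, remove one min);
-- heappop on the empty heap raises IndexError in Python — that input is excluded by Pre_.
def heapPop (l : List Int) : Int × List Int :=
  match PySem.List.min? l (fun x => x) with
  | some m => (m, l.erase m)
  | none => (0, [])

def swapLoopA : Nat → List Int × List Int → List Int × List Int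
  | 0, s => s
  | t+1, s =>
      let p := heapPop s.1
      let q := heapPop s.2
      swapLoopA t ((-q.1) :: p.2, p.1 :: q.2)

-- the final 'while aq: result += heappop(aq)' loop
def drainA (l : List Int) : Int :=
  match h : PySem.List.min? l (fun x => x) with
  | some m => m + drainA (l.erase m)
  | none => 0
termination_by l.length
decreasing_by
  have hm : m ∈ l := PySem.List.min?_mem h
  have h1 : (l.erase m).length = l.length - 1 := List.length_erase_of_mem hm
  have h2 : 0 < l.length := List.length_pos_of_mem hm
  omega

def solution (n : Int) (k : Int) (a : List Int) (b : List Int) : Int :=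
  let init := (PySem.List.pyRange 0 n 1).foldl
    (fun (s : List Int × List Int) i =>
      (PySem.List.pyGetD a i 0 :: s.1, (-(PySem.List.pyGetD b i 0)) :: s.2)) ([], [])
  drainA (swapLoopA k.toNat init).1

-- ===== PORT B =====
def scanStep (s : List Int × List Int) : List Int × List Int :=
  let m := (PySem.List.min? s.1 (fun x => x)).getD 0
  let t := (PySem.List.min? s.2 (fun x => x)).getD 0
  (s.1.set ((PySem.List.index? s.1 m).getD 0) (-t),
   s.2.set ((PySem.List.index? s.2 t).getD 0) m)

def swapLoopB : Nat → List Int × List Int → List Int × List Int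
  | 0, s => s
  | t+1, s => swapLoopB t (scanStep s)

def solution_alt (n : Int) (k : Int) (a : List Int) (b : List Int) : Int :=
  let la := (PySem.List.pyRange 0 n 1).map (fun i => PySem.List.pyGetD a i 0)
  let nb := (PySem.List.pyRange 0 n 1).map (fun i => -(PySem.List.pyGetD b i 0))
  (swapLoopB k.toNat (la, nb)).1.sum

-- ===== PRECONDITION & SPEC =====
-- A raises IndexError when n exceeds either list's length (a[i]/b[i]) or when k > 0 with
-- an empty pool (heappop from the empty heap); Pre_ excludes exactly those inputs.
def Pre_solution (n : Int) (k : Int) (a : List Int) (b : List Int) : Prop :=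
  n ≤ (a.length : Int) ∧ n ≤ (b.length : Int) ∧ (0 < k → 0 < n)
instance (n : Int) (k : Int) (a : List Int) (b : List Int) : Decidable (Pre_solution n k a b) := by unfold Pre_solution; infer_instance

def pvWitness_solution : Int × Int × List Int × List Int := (3, 2, [1, 2, 3], [4, 5, 6])

def Spec_solution (n : Int) (k : Int) (a : List Int) (b : List Int) (out : Int) : Prop := out = solution_alt n k a b
instance (n : Int) (k : Int) (a : List Int) (b : List Int) (out : Int) : Decidable (Spec_solution n k a b out) := by unfold Spec_solution; infer_instance

-- ===== CLAIM (what is proved, stated in full; the proofs are below) =====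
def Claim_equal_solution : Prop := ∀ (n : Int) (k : Int) (a : List Int) (b : List Int), Dom_solution n k a b → Pre_solution n k a b → Spec_solution n k a b (solution n k a b)

-- ===== LEMMAS AND PROOFS =====

-- min? (no key) is determined by the multiset
lemma min?_id_perm {l l' : List Int} (h : l.Perm l') :
    PySem.List.min? l (fun x => x) = PySem.List.min? l' (fun x => x) := by
  cases hl : PySem.List.min? l (fun x => x) with
  | none =>
    have h0 : l = [] := (PySem.List.min?_eq_none_iff l _).mp hl
    subst h0
    have : l' = [] := List.eq_nil_of_length_eq_zero (h.length_eq.symm)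
    subst this
    exact hl.symm
  | some m =>
    cases hl' : PySem.List.min? l' (fun x => x) with
    | none =>
      have h0 : l' = [] := (PySem.List.min?_eq_none_iff l' _).mp hl'
      subst h0
      have : l = [] := List.eq_nil_of_length_eq_zero h.length_eq
      subst this
      simp [PySem.List.min?] at hl
    | some m' =>
      have hm : m ∈ l := PySem.List.min?_mem hl
      have hm' : m' ∈ l' := PySem.List.min?_mem hl'
      have h1 : m ≤ m' := PySem.List.min?_isMin hl m' (h.mem_iff.mpr hm')
      have h2 : m' ≤ m := PySem.List.min?_isMin hl' m (h.mem_iff.mp hm)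
      simp [le_antisymm h1 h2]

lemma set_length_append (pre suf : List Int) (v x : Int) :
    (pre ++ v :: suf).set pre.length x = pre ++ x :: suf := by
  induction pre with
  | nil => simp
  | cons p ps ih => simp [ih]

-- replacing the first occurrence of v by x is, up to permutation, erase-then-cons
lemma set_index_perm (l : List Int) (v x : Int) (hv : v ∈ l) :
    (l.set ((PySem.List.index? l v).getD 0) x).Perm (x :: l.erase v) := by
  have hsome : (PySem.List.index? l v).isSome := (PySem.List.index?_isSome_iff l v).mpr hv
  obtain ⟨kk, hk⟩ := Option.isSome_iff_exists.mp hsome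
  obtain ⟨pre, suf, hl, hlen, hnot⟩ := (PySem.List.index?_eq_some_iff l v kk).mp hk
  subst hl
  rw [hk]
  simp only [Option.getD_some]
  rw [← hlen, set_length_append]
  rw [List.erase_append_right _ (by simpa using hnot), List.erase_cons_head]
  exact List.perm_middle

lemma loop_perm (t : Nat) : ∀ (aq bq la nb : List Int), aq ≠ [] → bq ≠ [] →
    aq.Perm la → bq.Perm nb →
    ((swapLoopA t (aq, bq)).1.Perm (swapLoopB t (la, nb)).1 ∧
     (swapLoopA t (aq, bq)).2.Perm (swapLoopB t (la, nb)).2) := by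
  induction t with
  | zero => intro aq bq la nb _ _ h1 h2; exact ⟨h1, h2⟩
  | succ t ih =>
    intro aq bq la nb haq hbq h1 h2
    obtain ⟨m, hm⟩ : ∃ m, PySem.List.min? aq (fun x => x) = some m := by
      cases h : PySem.List.min? aq (fun x => x) with
      | none => exact absurd ((PySem.List.min?_eq_none_iff aq _).mp h) haq
      | some m => exact ⟨m, rfl⟩
    obtain ⟨w, hw⟩ : ∃ w, PySem.List.min? bq (fun x => x) = some w := by
      cases h : PySem.List.min? bq (fun x => x) with
      | none => exact absurd ((PySem.List.min?_eq_none_iff bq _).mp h) hbq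
      | some w => exact ⟨w, rfl⟩
    have hmla : PySem.List.min? la (fun x => x) = some m := (min?_id_perm h1).symm.trans hm
    have hwnb : PySem.List.min? nb (fun x => x) = some w := (min?_id_perm h2).symm.trans hw
    have hmem_la : m ∈ la := PySem.List.min?_mem hmla
    have hmem_nb : w ∈ nb := PySem.List.min?_mem hwnb
    have hA : swapLoopA (t+1) (aq, bq) = swapLoopA t ((-w) :: aq.erase m, m :: bq.erase w) := by
      rw [swapLoopA]; simp [heapPop, hm, hw]
    have hB : swapLoopB (t+1) (la, nb) =
        swapLoopB t (la.set ((PySem.List.index? la m).getD 0) (-w),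
                     nb.set ((PySem.List.index? nb w).getD 0) m) := by
      rw [swapLoopB]; simp [scanStep, hmla, hwnb]
    rw [hA, hB]
    have p1 : ((-w) :: aq.erase m).Perm (la.set ((PySem.List.index? la m).getD 0) (-w)) :=
      ((List.Perm.cons (-w) (h1.erase m)).trans (set_index_perm la m (-w) hmem_la).symm)
    have p2 : (m :: bq.erase w).Perm (nb.set ((PySem.List.index? nb w).getD 0) m) :=
      ((List.Perm.cons m (h2.erase w)).trans (set_index_perm nb w m hmem_nb).symm)
    exact ih _ _ _ _ (by simp) (by simp) p1 p2

lemma drain_eq_sum (l : List Int) : drainA l = l.sum := by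
  induction l using drainA.induct with
  | case1 l m h ih =>
    rw [drainA]
    split
    · rename_i m' heq
      rw [h] at heq
      cases heq
      have hm : m ∈ l := PySem.List.min?_mem h
      have := (List.perm_cons_erase hm).sum_eq
      rw [ih, this, List.sum_cons]
    · rename_i heq
      rw [h] at heq
      cases heq
  | case2 l h =>
    have h0 : l = [] := (PySem.List.min?_eq_none_iff l _).mp h
    subst h0
    rw [drainA]
    rfl

lemma init_foldl (L : List Int) (f g : Int → Int) :
    ∀ acc : List Int × List Int,
      L.foldl (fun (s : List Int × List Int) i => (f i :: s.1, g i :: s.2)) acc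
        = ((L.map f).reverse ++ acc.1, (L.map g).reverse ++ acc.2) := by
  induction L with
  | nil => intro acc; simp
  | cons x xs ih => intro acc; simp [List.foldl_cons, ih]

-- ===== VERDICT (by name: the statement is the Claim_ definition above) =====
theorem solution_spec : Claim_equal_solution := by
  intro n k a b _hdom hpre
  obtain ⟨hna, hnb, hkn⟩ := hpre
  unfold Spec_solution solution solution_alt
  rw [init_foldl]
  simp only [List.append_nil]
  set la := (PySem.List.pyRange 0 n 1).map (fun i => PySem.List.pyGetD a i 0) with hla
  set nb := (PySem.List.pyRange 0 n 1).map (fun i => -(PySem.List.pyGetD b i 0)) with hnb'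
  by_cases hk : 0 < k
  · have hn : 0 < n := hkn hk
    have hR : (PySem.List.pyRange 0 n 1).length = n.toNat := by
      simpa using PySem.List.length_pyRange_one 0 n
    have hlane : la ≠ [] := by
      intro h
      have := congrArg List.length h
      simp [hla, hR] at this
      omega
    have hnbne : nb ≠ [] := by
      intro h
      have := congrArg List.length h
      simp [hnb', hR] at this
      omega
    have hp := loop_perm k.toNat la.reverse nb.reverse la nb
      (by simpa using hlane) (by simpa using hnbne) la.reverse_perm nb.reverse_perm
    rw [drain_eq_sum]
    exact hp.1.sum_eq
  · have hk0 : k.toNat = 0 := by omega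
    rw [hk0]
    simp [swapLoopA, swapLoopB, drain_eq_sum]
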